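-- pv_equiv track=rewrite | github.com/you741/Fire-Emblem-Alex-Legion-Graphic-Edition | festaples.py | getAttackableSquares
-- ===== SOURCE A (Python) =====
-- def getAttackableSquares(rnge,maxrnge,x,y):
--     "returns all attackable squares from (x,y)"
--     asq = [] #attackable squares
--     for i in range(rnge,maxrnge+1):
--         for dx in range(-i,i+1):
--             for dy in range(-i,i+1):
--                 if abs(dx) + abs(dy) == i and 0<=x+dx<=39 and 0<=y+dy<=23:
--                     asq.append((x+dx,y+dy))
--     return asq
-- ===== SOURCE B (Python) =====
-- def getAttackableSquares(rnge, maxrnge, x, y):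
--     "returns all attackable squares from (x,y)"
--     asq = []  # attackable squares
--     # only rings whose radius lies between the nearest and farthest board
--     # distance from (x,y) can contain board squares
--     dmin = max(0, x - 39, -x) + max(0, y - 23, -y)
--     dmax = max(x, 39 - x) + max(y, 23 - y)
--     for i in range(max(rnge, dmin), min(maxrnge, dmax) + 1):
--         # walk the ring directly: only columns on the board, and for each dx
--         # the only candidate offsets are dy = -(i-|dx|) and dy = +(i-|dx|)
--         for dx in range(max(-i, -x), min(i, 39 - x) + 1):
--             r = i - abs(dx)
--             if r == 0:
--                 if 0 <= y <= 23:
--                     asq.append((x + dx, y))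
--             else:
--                 if 0 <= y - r <= 23:
--                     asq.append((x + dx, y - r))
--                 if 0 <= y + r <= 23:
--                     asq.append((x + dx, y + r))
--     return asq
-- ===== Notes on version B (the rewrite author's own statement) =====
-- stated objective: alternative
-- what changed: B enumerates each diamond ring directly (for each on-board column dx the only candidate offsets are dy = ±(i-|dx|)) and clamps the ring radii to those that can touch the 40x24 board, instead of A's scan of all (2i+1)^2 (dx,dy) offsets per ring; scan order is preserved.
import Mathlib
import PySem

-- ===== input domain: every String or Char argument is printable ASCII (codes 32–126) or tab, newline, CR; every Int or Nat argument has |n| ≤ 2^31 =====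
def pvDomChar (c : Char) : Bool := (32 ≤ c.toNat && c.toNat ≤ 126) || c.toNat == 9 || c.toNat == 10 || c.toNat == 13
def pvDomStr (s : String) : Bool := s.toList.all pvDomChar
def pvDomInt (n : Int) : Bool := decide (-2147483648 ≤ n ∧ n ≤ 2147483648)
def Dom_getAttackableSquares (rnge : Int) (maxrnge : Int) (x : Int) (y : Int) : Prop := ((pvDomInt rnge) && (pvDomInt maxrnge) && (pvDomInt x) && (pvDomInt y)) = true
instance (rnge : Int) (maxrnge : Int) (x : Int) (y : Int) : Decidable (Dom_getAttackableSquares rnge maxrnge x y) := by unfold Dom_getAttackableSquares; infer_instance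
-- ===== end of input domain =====

-- B clamps the ring radii to those that can touch the 40×24 board and walks each ring's
-- on-board columns directly (dy = ±(i-|dx|)) instead of scanning all (2i+1)² offsets; same output.

-- ===== PORT A =====
def getAttackableSquares (rnge : Int) (maxrnge : Int) (x : Int) (y : Int) : List (Int × Int) :=
  (PySem.List.pyRange rnge (maxrnge + 1) 1).foldl (fun asq i =>
    (PySem.List.pyRange (-i) (i + 1) 1).foldl (fun asq dx =>
      (PySem.List.pyRange (-i) (i + 1) 1).foldl (fun asq dy =>
        if |dx| + |dy| = i ∧ 0 ≤ x + dx ∧ x + dx ≤ 39 ∧ 0 ≤ y + dy ∧ y + dy ≤ 23 then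
          asq ++ [(x + dx, y + dy)]
        else asq) asq) asq) []

-- ===== PORT B =====
-- the squares Source B appends for one value of dx in ring i (the body of B's inner loop)
def pvRingSeg (x y i dx : Int) : List (Int × Int) :=
  let r := i - |dx|
  if r = 0 then
    if 0 ≤ y ∧ y ≤ 23 then [(x + dx, y)] else []
  else
    (if 0 ≤ y - r ∧ y - r ≤ 23 then [(x + dx, y - r)] else []) ++
    (if 0 ≤ y + r ∧ y + r ≤ 23 then [(x + dx, y + r)] else [])

def getAttackableSquares_alt (rnge : Int) (maxrnge : Int) (x : Int) (y : Int) : List (Int × Int) :=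
  let dmin := max (max 0 (x - 39)) (-x) + max (max 0 (y - 23)) (-y)
  let dmax := max x (39 - x) + max y (23 - y)
  (PySem.List.pyRange (max rnge dmin) (min maxrnge dmax + 1) 1).foldl (fun asq i =>
    (PySem.List.pyRange (max (-i) (-x)) (min i (39 - x) + 1) 1).foldl (fun asq dx =>
      asq ++ pvRingSeg x y i dx) asq) []

-- ===== PRECONDITION & SPEC =====
def Spec_getAttackableSquares (rnge : Int) (maxrnge : Int) (x : Int) (y : Int) (out : List (Int × Int)) : Prop := out = getAttackableSquares_alt rnge maxrnge x y
instance (rnge : Int) (maxrnge : Int) (x : Int) (y : Int) (out : List (Int × Int)) : Decidable (Spec_getAttackableSquares rnge maxrnge x y out) := by unfold Spec_getAttackableSquares; infer_instance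

-- ===== CLAIM (what is proved, stated in full; the proofs are below) =====
def Claim_equal_getAttackableSquares : Prop := ∀ (rnge : Int) (maxrnge : Int) (x : Int) (y : Int), Dom_getAttackableSquares rnge maxrnge x y → Spec_getAttackableSquares rnge maxrnge x y (getAttackableSquares rnge maxrnge x y)

-- ===== LEMMAS AND PROOFS =====

-- a foldl whose body never changes the accumulator is the identity
lemma pv_foldl_id {α β : Type} (l : List α) (f : β → α → β) (init : β)
    (h : ∀ acc a, a ∈ l → f acc a = acc) : l.foldl f init = init := by
  induction l generalizing init with
  | nil => rfl
  | cons a l ih =>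
    rw [List.foldl_cons, h init a List.mem_cons_self]
    exact ih init (fun acc b hb => h acc b (List.mem_cons_of_mem a hb))
  -- (this is a loop-shape fact specific to A's vacuous rings; no PySem lemma states it)

-- A's dy-scan does nothing when the append condition can never hold
lemma pv_dyloop_id (x y i dx : Int) (asq : List (Int × Int))
    (h : ∀ dy : Int, ¬ (|dx| + |dy| = i ∧ 0 ≤ x + dx ∧ x + dx ≤ 39 ∧ 0 ≤ y + dy ∧ y + dy ≤ 23)) :
    (PySem.List.pyRange (-i) (i + 1) 1).foldl (fun asq dy =>
        if |dx| + |dy| = i ∧ 0 ≤ x + dx ∧ x + dx ≤ 39 ∧ 0 ≤ y + dy ∧ y + dy ≤ 23 then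
          asq ++ [(x + dx, y + dy)]
        else asq) asq = asq :=
  pv_foldl_id _ _ _ (fun _ dy _ => if_neg (h dy))

-- the elements of range(-i, i+1) with |dy| = r, in scan order, are [-r, r] (just [0] if r = 0)
lemma pv_filter_abs (i r : Int) (h0 : 0 ≤ r) (hr : r ≤ i) (p : Int → Bool) :
    (PySem.List.pyRange (-i) (i + 1) 1).filter (fun dy => decide (|dy| = r) && p dy)
      = (if r = 0 then [(0 : Int)] else [-r, r]).filter p := by
  have hnil : ∀ a b : Int, (∀ z, a ≤ z → z < b → ¬ |z| = r) →
      (PySem.List.pyRange a b 1).filter (fun dy => decide (|dy| = r) && p dy) = [] := by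
    intro a b h
    rw [List.filter_eq_nil_iff]
    intro z hz
    rw [PySem.List.mem_pyRange_one] at hz
    simp [h z hz.1 hz.2]
  rcases eq_or_lt_of_le h0 with h | h
  · subst h
    rw [PySem.List.pyRange_one_append (-i) 0 (i + 1) (by omega) (by omega),
        PySem.List.pyRange_one_append 0 1 (i + 1) (by omega) (by omega)]
    rw [show PySem.List.pyRange (0:Int) 1 1 = [0] by
      have := PySem.List.pyRange_one_singleton (0 : Int); simpa using this]
    simp only [List.filter_append]
    rw [hnil (-i) 0 (by intro z h1 h2; simp only [abs_eq_zero]; omega),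
        hnil 1 (i + 1) (by intro z h1 h2; simp only [abs_eq_zero]; omega)]
    cases hp : p 0 <;> simp [List.filter, hp]
  · rw [PySem.List.pyRange_one_append (-i) (-r) (i + 1) (by omega) (by omega),
        PySem.List.pyRange_one_append (-r) (-r + 1) (i + 1) (by omega) (by omega),
        PySem.List.pyRange_one_append (-r + 1) r (i + 1) (by omega) (by omega),
        PySem.List.pyRange_one_append r (r + 1) (i + 1) (by omega) (by omega)]
    rw [show PySem.List.pyRange (-r) (-r + 1) 1 = [-r] from PySem.List.pyRange_one_singleton (-r),
        PySem.List.pyRange_one_singleton r]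
    simp only [List.filter_append]
    rw [hnil (-i) (-r) (by intro z h1 h2; rw [abs_eq h0]; omega),
        hnil (-r + 1) r (by intro z h1 h2; rw [abs_eq h0]; omega),
        hnil (r + 1) (i + 1) (by intro z h1 h2; rw [abs_eq h0]; omega)]
    have hne : ¬ r = 0 := by omega
    simp only [List.filter, abs_eq h0, List.append_nil, List.nil_append, if_neg hne]
    cases hp : p (-r) <;> cases hq : p r <;> simp

-- the filtered ring column, mapped to squares, is exactly B's per-column segment (r abstract, no abs)
lemma pv_seg_eq (x y r : Int) (h0 : 0 ≤ r) :
    (((if r = 0 then [(0 : Int)] else [-r, r]).filter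
        (fun dy => decide (0 ≤ y + dy ∧ y + dy ≤ 23))).map (fun dy => (x, y + dy)))
      = (if r = 0 then (if 0 ≤ y ∧ y ≤ 23 then [(x, y)] else [])
         else
           (if 0 ≤ y - r ∧ y - r ≤ 23 then [(x, y - r)] else []) ++
           (if 0 ≤ y + r ∧ y + r ≤ 23 then [(x, y + r)] else [])) := by
  by_cases hz : r = 0
  · subst hz
    by_cases hc : 0 ≤ y ∧ y ≤ 23 <;> simp [List.filter, hc]
  · rw [if_neg hz, if_neg hz, show y - r = y + -r from sub_eq_add_neg y r]
    by_cases hL1 : r ≤ y <;> by_cases hL2 : y ≤ 23 + r <;>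
      by_cases hR1 : 0 ≤ y + r <;> by_cases hR2 : y + r ≤ 23 <;>
      simp [List.filter, hL1, hL2, hR1, hR2]

-- A's inner dy-scan over ring i at an on-board column offset dx appends exactly B's segment
lemma pv_body_eq (x y i dx : Int) (h1 : -i ≤ dx) (h2 : dx ≤ i)
    (hx1 : 0 ≤ x + dx) (hx2 : x + dx ≤ 39) (asq : List (Int × Int)) :
    (PySem.List.pyRange (-i) (i + 1) 1).foldl (fun asq dy =>
        if |dx| + |dy| = i ∧ 0 ≤ x + dx ∧ x + dx ≤ 39 ∧ 0 ≤ y + dy ∧ y + dy ≤ 23 then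
          asq ++ [(x + dx, y + dy)]
        else asq) asq
      = asq ++ pvRingSeg x y i dx := by
  have habs : |dx| ≤ i := abs_le.mpr ⟨h1, h2⟩
  have hnn : 0 ≤ |dx| := abs_nonneg dx
  set r : Int := i - |dx| with hr
  have h0r : 0 ≤ r := by omega
  have hrle : r ≤ i := by omega
  have hstep : (fun (asq : List (Int × Int)) (dy : Int) =>
      if |dx| + |dy| = i ∧ 0 ≤ x + dx ∧ x + dx ≤ 39 ∧ 0 ≤ y + dy ∧ y + dy ≤ 23 then
        asq ++ [(x + dx, y + dy)]
      else asq)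
      = (fun asq dy =>
      if (decide (|dy| = r) && decide (0 ≤ y + dy ∧ y + dy ≤ 23)) = true then
        asq ++ [(x + dx, y + dy)]
      else asq) := by
    funext asq dy
    have heq : (|dx| + |dy| = i ∧ 0 ≤ x + dx ∧ x + dx ≤ 39 ∧ 0 ≤ y + dy ∧ y + dy ≤ 23)
        ↔ ((decide (|dy| = r) && decide (0 ≤ y + dy ∧ y + dy ≤ 23)) = true) := by
      simp only [Bool.and_eq_true, decide_eq_true_eq]
      constructor
      · rintro ⟨ha, _, _, hb⟩; exact ⟨by omega, hb⟩
      · rintro ⟨ha, hb⟩; exact ⟨by omega, hx1, hx2, hb⟩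
    split_ifs with hA hB hB
    · rfl
    · exact absurd (heq.mp hA) hB
    · exact absurd (heq.mpr hB) hA
    · rfl
  rw [hstep, PySem.List.foldl_append_if
        (fun dy => decide (|dy| = r) && decide (0 ≤ y + dy ∧ y + dy ≤ 23))
        (fun dy => (x + dx, y + dy)),
      pv_filter_abs i r h0r hrle]
  congr 1
  simp only [pvRingSeg, ← hr]
  exact pv_seg_eq (x + dx) y r h0r

-- A's full column scan over ring i equals B's scan of the clamped (on-board) columns
lemma pv_dx_eq (x y i : Int) (asq : List (Int × Int)) :
    (PySem.List.pyRange (-i) (i + 1) 1).foldl (fun asq dx =>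
      (PySem.List.pyRange (-i) (i + 1) 1).foldl (fun asq dy =>
        if |dx| + |dy| = i ∧ 0 ≤ x + dx ∧ x + dx ≤ 39 ∧ 0 ≤ y + dy ∧ y + dy ≤ 23 then
          asq ++ [(x + dx, y + dy)]
        else asq) asq) asq
      = (PySem.List.pyRange (max (-i) (-x)) (min i (39 - x) + 1) 1).foldl (fun asq dx =>
          asq ++ pvRingSeg x y i dx) asq := by
  set body : List (Int × Int) → Int → List (Int × Int) := fun asq dx =>
      (PySem.List.pyRange (-i) (i + 1) 1).foldl (fun asq dy =>
        if |dx| + |dy| = i ∧ 0 ≤ x + dx ∧ x + dx ≤ 39 ∧ 0 ≤ y + dy ∧ y + dy ≤ 23 then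
          asq ++ [(x + dx, y + dy)]
        else asq) asq with hbody
  have hid : ∀ (acc : List (Int × Int)) (dx : Int),
      (∀ dy : Int, ¬ (|dx| + |dy| = i ∧ 0 ≤ x + dx ∧ x + dx ≤ 39 ∧ 0 ≤ y + dy ∧ y + dy ≤ 23)) →
      body acc dx = acc := by
    intro acc dx h
    rw [hbody]
    exact pv_dyloop_id x y i dx acc h
  by_cases hle : min i (39 - x) + 1 ≤ max (-i) (-x)
  · rw [PySem.List.pyRange_one_eq_nil hle, List.foldl_nil]
    refine pv_foldl_id _ _ _ ?_
    intro acc dx hdx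
    rw [PySem.List.mem_pyRange_one] at hdx
    exact hid acc dx (by intro dy h; obtain ⟨_, h2, h3, _⟩ := h; omega)
  · rw [PySem.List.pyRange_one_append (-i) (max (-i) (-x)) (i + 1) (by omega) (by omega),
        PySem.List.pyRange_one_append (max (-i) (-x)) (min i (39 - x) + 1) (i + 1) (by omega) (by omega),
        List.foldl_append, List.foldl_append]
    rw [pv_foldl_id (PySem.List.pyRange (-i) (max (-i) (-x)) 1) _ asq ?hpre]
    case hpre =>
      intro acc dx hdx
      rw [PySem.List.mem_pyRange_one] at hdx
      exact hid acc dx (by intro dy h; obtain ⟨_, h2, h3, _⟩ := h; omega)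
    rw [pv_foldl_id (PySem.List.pyRange (min i (39 - x) + 1) (i + 1) 1) _ _ ?hpost]
    case hpost =>
      intro acc dx hdx
      rw [PySem.List.mem_pyRange_one] at hdx
      exact hid acc dx (by intro dy h; obtain ⟨_, h2, h3, _⟩ := h; omega)
    refine PySem.List.foldl_congr_mem _ _ _ _ ?_
    intro acc dx hdx
    rw [PySem.List.mem_pyRange_one] at hdx
    rw [hbody]
    exact pv_body_eq x y i dx (by omega) (by omega) (by omega) (by omega) acc

-- a ring whose radius is below the nearest or above the farthest board distance adds nothing
lemma pv_ring_id (x y i : Int) (asq : List (Int × Int))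
    (h : i < max (max 0 (x - 39)) (-x) + max (max 0 (y - 23)) (-y) ∨
         max x (39 - x) + max y (23 - y) < i) :
    (PySem.List.pyRange (-i) (i + 1) 1).foldl (fun asq dx =>
      (PySem.List.pyRange (-i) (i + 1) 1).foldl (fun asq dy =>
        if |dx| + |dy| = i ∧ 0 ≤ x + dx ∧ x + dx ≤ 39 ∧ 0 ≤ y + dy ∧ y + dy ≤ 23 then
          asq ++ [(x + dx, y + dy)]
        else asq) asq) asq = asq := by
  refine pv_foldl_id _ _ _ ?_
  intro acc dx _
  refine pv_dyloop_id x y i dx acc ?_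
  rintro dy ⟨hsum, hx1, hx2, hy1, hy2⟩
  rcases abs_cases dx with ⟨hdx, _⟩ | ⟨hdx, _⟩ <;>
    rcases abs_cases dy with ⟨hdy, _⟩ | ⟨hdy, _⟩ <;> omega

-- ===== VERDICT (by name: the statement is the Claim_ definition above) =====
theorem getAttackableSquares_spec : Claim_equal_getAttackableSquares := by
  intro rnge maxrnge x y _
  unfold Spec_getAttackableSquares getAttackableSquares getAttackableSquares_alt
  simp only []
  set dmin := max (max 0 (x - 39)) (-x) + max (max 0 (y - 23)) (-y) with hdmin
  set dmax := max x (39 - x) + max y (23 - y) with hdmax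
  by_cases hle : min maxrnge dmax + 1 ≤ max rnge dmin
  · rw [PySem.List.pyRange_one_eq_nil hle, List.foldl_nil]
    refine pv_foldl_id _ _ _ ?_
    intro acc i hi
    rw [PySem.List.mem_pyRange_one] at hi
    exact pv_ring_id x y i acc (by omega)
  · rw [PySem.List.pyRange_one_append rnge (max rnge dmin) (maxrnge + 1) (by omega) (by omega),
        PySem.List.pyRange_one_append (max rnge dmin) (min maxrnge dmax + 1) (maxrnge + 1) (by omega) (by omega),
        List.foldl_append, List.foldl_append]
    rw [pv_foldl_id (PySem.List.pyRange rnge (max rnge dmin) 1) _ [] ?hpre]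
    case hpre =>
      intro acc i hi
      rw [PySem.List.mem_pyRange_one] at hi
      exact pv_ring_id x y i acc (by omega)
    rw [pv_foldl_id (PySem.List.pyRange (min maxrnge dmax + 1) (maxrnge + 1) 1) _ _ ?hpost]
    case hpost =>
      intro acc i hi
      rw [PySem.List.mem_pyRange_one] at hi
      exact pv_ring_id x y i acc (by omega)
    refine PySem.List.foldl_congr_mem _ _ _ _ ?_
    intro acc i _
    exact pv_dx_eq x y i acc
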